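-- pv_equiv track=rewrite | github.com/w3f/jamtestvectors | shuffle/main.py | varied_seed
-- ===== SOURCE A (Python) =====
-- def varied_seed(n):
--     # large 32 bit prime
--     large_prime = 2147483647
--     result = []
--     next = n % large_prime
--
--     # next is always a 32-bit prime, so it fits in 4 bytes.
--     # this loop generates a cycle of modular exponents of a generator.
--     # if this generator is unknown, this cycle is in practice unpredictable,
--     # so this should generate a sequence that looks a bit like random
--     # and should be enough for simple tests.
--     for i in range(8):
--         result = result + list(to_le_bytes(next, 4))
--         next = next * n % large_prime
--
--     return result
--
-- def to_le_bytes(n, k):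
--     return n.to_bytes(k, 'little')
-- ===== SOURCE B (Python) =====
-- def varied_seed(n):
--     large_prime = 2147483647
--     return [b for i in range(8) for b in pow(n, i + 1, large_prime).to_bytes(4, 'little')]
-- ===== Notes on version B (the rewrite author's own statement) =====
-- stated objective: alternative
-- what changed: B computes each four-byte chunk directly as a modular power of n (built-in three-argument pow) inside a single flattening comprehension, eliminating A's threaded running-product accumulator and repeated list concatenation.
import Mathlib
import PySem

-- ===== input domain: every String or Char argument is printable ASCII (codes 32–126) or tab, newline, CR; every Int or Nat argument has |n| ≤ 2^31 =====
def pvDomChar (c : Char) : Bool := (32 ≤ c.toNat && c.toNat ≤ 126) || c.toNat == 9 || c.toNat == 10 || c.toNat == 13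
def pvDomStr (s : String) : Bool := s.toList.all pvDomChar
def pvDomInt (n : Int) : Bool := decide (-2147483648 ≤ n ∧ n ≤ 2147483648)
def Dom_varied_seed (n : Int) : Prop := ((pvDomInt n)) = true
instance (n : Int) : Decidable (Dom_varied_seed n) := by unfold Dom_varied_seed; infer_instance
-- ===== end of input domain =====

-- B replaces A's running-product accumulator (next = next * n % p) with a direct
-- closed form per chunk: pow(n, i+1, p), flattened in one comprehension (alternative decomposition).

-- ===== PORT A =====
-- n.to_bytes(k, 'little') for 0 ≤ n < 256^k (always true where A calls it)
def to_le_bytes (x : Int) (k : Nat) : List Int :=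
  (List.range k).map (fun j => (x / (256:Int) ^ j) % 256)

def varied_seed (n : Int) : List Int :=
  let large_prime : Int := 2147483647
  let st := (PySem.List.pyRange 0 8 1).foldl
    (fun (st : List Int × Int) _ =>
      (st.1 ++ to_le_bytes st.2 4, PySem.Int.mod (st.2 * n) large_prime))
    ([], PySem.Int.mod n large_prime)
  st.1

-- ===== PORT B =====
def varied_seed_alt (n : Int) : List Int :=
  let large_prime : Int := 2147483647
  (List.range 8).flatMap (fun i => to_le_bytes (PySem.Int.powMod n (i + 1) large_prime) 4)

-- ===== PRECONDITION & SPEC =====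
def Spec_varied_seed (n : Int) (out : List Int) : Prop := out = varied_seed_alt n
instance (n : Int) (out : List Int) : Decidable (Spec_varied_seed n out) := by unfold Spec_varied_seed; infer_instance

-- ===== CLAIM (what is proved, stated in full; the proofs are below) =====
def Claim_equal_varied_seed : Prop := ∀ (n : Int), Dom_varied_seed n → Spec_varied_seed n (varied_seed n)

-- ===== LEMMAS AND PROOFS =====
theorem pv_step (a b : Int) :
    PySem.Int.mod (PySem.Int.mod a 2147483647 * b) 2147483647
      = PySem.Int.mod (a * b) 2147483647 := by
  rw [PySem.Int.mod_eq_emod_of_pos (a := a) (by norm_num)]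
  rw [PySem.Int.mod_eq_emod_of_pos (by norm_num), PySem.Int.mod_eq_emod_of_pos (by norm_num)]
  rw [Int.mul_emod, Int.mul_emod a b, Int.emod_emod_of_dvd _ dvd_rfl]

-- ===== VERDICT (by name: the statement is the Claim_ definition above) =====
theorem varied_seed_spec : Claim_equal_varied_seed := by
  intro n _
  show varied_seed n = varied_seed_alt n
  simp only [varied_seed, varied_seed_alt, PySem.Int.powMod,
    show PySem.List.pyRange 0 8 1 = [0,1,2,3,4,5,6,7] from by decide,
    show List.range 8 = [0,1,2,3,4,5,6,7] from by decide,
    List.foldl, List.flatMap, List.map, pv_step, List.append_assoc, List.flatten]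
  ring_nf
  rfl
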